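-- pv_equiv track=rewrite | github.com/Seungkyu-Han/BOJ | 프로그래머스/2/250136. ［PCCP 기출문제］ 2번 ／ 석유 시추/［PCCP 기출문제］ 2번 ／ 석유 시추.py | dfs
-- ===== SOURCE A (Python) =====
-- def dfs(land):
--     x_length = len(land[0])
--     y_length = len(land)
--
--     acc = [0 for _ in range(x_length)]
--
--     visited = [[False for _ in range(x_length)] for _ in range(y_length)]
--
--     for x in range(x_length):
--         for y in range(y_length):
--             if visited[y][x]:
--                 continue
--
--
--             visited[y][x] = True
--
--             if land[y][x] == 0:
--                 continue
--
--             min_x, max_x = x, x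
--             cur = 1
--
--             need_visit = [[y, x]]
--
--             while need_visit:
--
--                 cur_y, cur_x = need_visit.pop()
--
--                 for next_y, next_x in [[cur_y + 1, cur_x], [cur_y - 1, cur_x], [cur_y, cur_x + 1], [cur_y, cur_x - 1]]:
--                     if 0 <= next_x < x_length and 0 <= next_y < y_length and visited[next_y][next_x] is False and land[next_y][next_x] == 1:
--                         visited[next_y][next_x] = True
--                         min_x, max_x = min(min_x, next_x), max(max_x, next_x)
--                         need_visit.append([next_y, next_x])
--                         cur += 1
--             for to_x in range(min_x, max_x + 1):
--                 acc[to_x] += cur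
--
--     return acc
-- ===== SOURCE B (Python) =====
-- def dfs(land):
--     h = len(land)
--     w = len(land[0])
--     acc = [0] * w
--     seen = set()
--     for x in range(w):
--         for y in range(h):
--             if (y, x) in seen or land[y][x] == 0:
--                 continue
--             # level-synchronous flood fill: grow the component a whole frontier at a time
--             comp = {(y, x)}
--             frontier = {(y, x)}
--             while frontier:
--                 frontier = {(cy + dy, cx + dx)
--                             for cy, cx in frontier
--                             for dy, dx in ((1, 0), (-1, 0), (0, 1), (0, -1))
--                             if 0 <= cy + dy < h and 0 <= cx + dx < w
--                             and (cy + dy, cx + dx) not in seen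
--                             and (cy + dy, cx + dx) not in comp
--                             and land[cy + dy][cx + dx] == 1}
--                 comp |= frontier
--             seen |= comp
--             size = len(comp)
--             cols = [c for _, c in comp]
--             lo, hi = min(cols), max(cols)
--             for to_x in range(lo, hi + 1):
--                 acc[to_x] += size
--     return acc
-- ===== Notes on version B (the rewrite author's own statement) =====
-- stated objective: alternative
-- what changed: A's cell-at-a-time DFS with an explicit LIFO stack, a full boolean visited matrix (marking even zero cells) and min/max/size maintained incrementally during the walk is replaced by a level-synchronous flood fill: each component is grown a whole frontier SET at a time via a set comprehension over the previous frontier, only component cells enter the global seen set of coordinate tuples, and size/min/max are aggregated from the finished component afterwards.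
import Mathlib
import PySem

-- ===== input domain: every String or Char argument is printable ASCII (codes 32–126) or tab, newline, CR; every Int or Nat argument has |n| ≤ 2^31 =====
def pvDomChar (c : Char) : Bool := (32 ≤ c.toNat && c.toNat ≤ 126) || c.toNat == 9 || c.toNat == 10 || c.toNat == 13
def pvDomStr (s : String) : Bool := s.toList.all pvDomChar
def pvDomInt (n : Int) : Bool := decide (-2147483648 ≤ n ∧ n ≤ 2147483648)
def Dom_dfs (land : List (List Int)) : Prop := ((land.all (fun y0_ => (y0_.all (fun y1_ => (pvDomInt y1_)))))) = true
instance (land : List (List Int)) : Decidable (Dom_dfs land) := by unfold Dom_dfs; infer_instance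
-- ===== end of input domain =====

-- B replaces A's cell-at-a-time stack DFS (visited matrix, min/max/count maintained during the
-- walk) by a level-synchronous flood fill: the whole frontier set is expanded at once into a new
-- frontier set, zero cells are never marked, and size/min/max are aggregated afterwards.

-- ===== PORT A =====
-- shared literal read of `land[y][x]` (both Pythons perform exactly this double indexing)
def dfsLandAt (land : List (List Int)) (y x : Int) : Option Int :=
  (PySem.List.pyGet? land y).bind fun r => PySem.List.pyGet? r x

-- `visited[y][x]` (read) and `visited[y][x] = True` (write); inside A the indices are always
-- nonnegative and in range, so `.toNat`-based update is exact there
def dfsGet2d (m : List (List Bool)) (y x : Int) : Option Bool :=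
  (PySem.List.pyGet? m y).bind fun r => PySem.List.pyGet? r x

def dfsSet2d (m : List (List Bool)) (y x : Int) : List (List Bool) :=
  m.set y.toNat ((m.getD y.toNat []).set x.toNat true)

-- number of `False` entries of the visited matrix: termination measure of A's while loop
def dfsFalse (m : List (List Bool)) : Nat :=
  (m.map (fun r => r.countP (fun b => !b))).sum

lemma pvSum_set_lt : ∀ (l : List Nat) (n : Nat) (a b : Nat), l[n]? = some a → b < a →
    (l.set n b).sum < l.sum := by
  intro l
  induction l with
  | nil => intro n a b h _; simp at h
  | cons c t ih =>
    intro n a b h hb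
    cases n with
    | zero =>
      simp only [List.getElem?_cons_zero, Option.some.injEq] at h
      subst h
      simp only [List.set_cons_zero, List.sum_cons]
      omega
    | succ m =>
      simp only [List.getElem?_cons_succ] at h
      have := ih m a b h hb
      simp only [List.set_cons_succ, List.sum_cons]
      omega

lemma pvCountP_set_true : ∀ (r : List Bool) (k : Nat), r[k]? = some false →
    (r.set k true).countP (fun b => !b) < r.countP (fun b => !b) := by
  intro r
  induction r with
  | nil => intro k h; simp at h
  | cons a t ih =>
    intro k h
    cases k with
    | zero =>
      simp only [List.getElem?_cons_zero, Option.some.injEq] at h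
      subst h; simp
    | succ m =>
      simp only [List.getElem?_cons_succ] at h
      have := ih m h
      simp only [List.set_cons_succ, List.countP_cons]
      omega

lemma pvFalse_set2d (m : List (List Bool)) (y x : Int) (hy : 0 ≤ y) (hx : 0 ≤ x)
    (h : dfsGet2d m y x = some false) : dfsFalse (dfsSet2d m y x) < dfsFalse m := by
  unfold dfsGet2d at h
  rw [PySem.List.pyGet?_of_nonneg m hy] at h
  cases hr : m[y.toNat]? with
  | none => rw [hr] at h; simp at h
  | some r =>
    rw [hr] at h
    simp only [Option.bind_some] at h
    rw [PySem.List.pyGet?_of_nonneg r hx] at h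
    unfold dfsSet2d dfsFalse
    have hg : m.getD y.toNat [] = r := by
      simp [List.getD, hr]
    rw [hg, List.map_set]
    exact pvSum_set_lt _ _ _ _ (by simp [hr]) (pvCountP_set_true r x.toNat h)

-- one neighbour test+push of A's inner `for next_y, next_x in [...]` loop
-- state: (visited, need_visit (head = Python's end), min_x, max_x, cur)
def dfsStep (land : List (List Int)) (h w : Int)
    (st : List (List Bool) × List (Int × Int) × Int × Int × Int) (q : Int × Int) :
    List (List Bool) × List (Int × Int) × Int × Int × Int :=
  if 0 ≤ q.2 ∧ q.2 < w ∧ 0 ≤ q.1 ∧ q.1 < h ∧ dfsGet2d st.1 q.1 q.2 = some false ∧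
      dfsLandAt land q.1 q.2 = some 1 then
    (dfsSet2d st.1 q.1 q.2, q :: st.2.1, min st.2.2.1 q.2, max st.2.2.2.1 q.2, st.2.2.2.2 + 1)
  else st

lemma pvStep_measure (land : List (List Int)) (h w : Int)
    (st : List (List Bool) × List (Int × Int) × Int × Int × Int) (q : Int × Int) :
    5 * dfsFalse (dfsStep land h w st q).1 + (dfsStep land h w st q).2.1.length ≤
      5 * dfsFalse st.1 + st.2.1.length := by
  unfold dfsStep
  split
  · next hg =>
    have := pvFalse_set2d st.1 q.1 q.2 (by omega) (by omega) hg.2.2.2.2.1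
    simp only [List.length_cons]
    omega
  · exact le_refl _

lemma pvFold_measure (land : List (List Int)) (h w : Int) :
    ∀ (l : List (Int × Int)) (st : List (List Bool) × List (Int × Int) × Int × Int × Int),
    5 * dfsFalse (l.foldl (dfsStep land h w) st).1 + (l.foldl (dfsStep land h w) st).2.1.length ≤
      5 * dfsFalse st.1 + st.2.1.length := by
  intro l
  induction l with
  | nil => intro st; exact le_refl _
  | cons q t ih =>
    intro st
    exact le_trans (ih (dfsStep land h w st q)) (pvStep_measure land h w st q)

-- A's `while need_visit:` loop; returns (visited, min_x, max_x, cur)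
def dfsLoop (land : List (List Int)) (h w : Int) :
    List (List Bool) × List (Int × Int) × Int × Int × Int →
    List (List Bool) × Int × Int × Int
  | (v, [], mn, mx, cnt) => (v, mn, mx, cnt)
  | (v, c :: rest, mn, mx, cnt) =>
      dfsLoop land h w
        (([(c.1 + 1, c.2), (c.1 - 1, c.2), (c.1, c.2 + 1), (c.1, c.2 - 1)]).foldl
          (dfsStep land h w) (v, rest, mn, mx, cnt))
  termination_by st => 5 * dfsFalse st.1 + st.2.1.length
  decreasing_by
    have hm := pvFold_measure land h w
      [(c.1 + 1, c.2), (c.1 - 1, c.2), (c.1, c.2 + 1), (c.1, c.2 - 1)] (v, rest, mn, mx, cnt)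
    simp only [List.length_cons] at *
    omega

-- `acc[to_x] += cur`
def dfsBump (acc : List Int) (i v : Int) : List Int :=
  PySem.List.pySetD acc i (PySem.List.pyGetD acc i 0 + v)

def dfs (land : List (List Int)) : List Int :=
  match land with
  | [] => []  -- Python raises IndexError on `land[0]` here; excluded by Pre_dfs
  | r0 :: _ =>
    let w : Int := r0.length
    let h : Int := land.length
    let acc0 : List Int := (PySem.List.pyRange 0 w 1).map (fun _ => (0 : Int))
    let v0 : List (List Bool) :=
      (PySem.List.pyRange 0 h 1).map (fun _ => (PySem.List.pyRange 0 w 1).map (fun _ => false))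
    ((PySem.List.pyRange 0 w 1).foldl (fun st x =>
      (PySem.List.pyRange 0 h 1).foldl (fun (st : List (List Bool) × List Int) y =>
        if dfsGet2d st.1 y x = some true then st
        else
          let v := dfsSet2d st.1 y x
          if dfsLandAt land y x = some 0 then (v, st.2)
          else
            let r := dfsLoop land h w (v, [(y, x)], x, x, 1)
            (r.1, (PySem.List.pyRange r.2.1 (r.2.2.1 + 1) 1).foldl
              (fun a i => dfsBump a i r.2.2.2) st.2)) st)
      (v0, acc0)).2

-- ===== PORT B =====
-- the four neighbour offsets applied to one frontier cell
def dfsAltNbrs (c : Int × Int) : List (Int × Int) :=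
  [(c.1 + 1, c.2), (c.1 - 1, c.2), (c.1, c.2 + 1), (c.1, c.2 - 1)]

-- B's set comprehension: next frontier = fresh in-bounds oil neighbours of the current frontier
def dfsAltGrow (land : List (List Int)) (h w : Int)
    (seen comp frontier : PySem.Set (Int × Int)) : PySem.Set (Int × Int) :=
  PySem.Set.ofList ((frontier.flatMap dfsAltNbrs).filter (fun q =>
    decide (0 ≤ q.1 ∧ q.1 < h ∧ 0 ≤ q.2 ∧ q.2 < w) &&
    !(PySem.Set.contains seen q) && !(PySem.Set.contains comp q) &&
    decide (dfsLandAt land q.1 q.2 = some 1)))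

-- number of in-bounds cells not yet in `comp`: termination measure of B's while loop
def dfsUnseen (h w : Int) (s : PySem.Set (Int × Int)) : Nat :=
  ((PySem.List.pyRange 0 h 1).flatMap
    (fun y => (PySem.List.pyRange 0 w 1).map (fun x => (y, x)))).countP
    (fun p => !(PySem.Set.contains s p))

lemma pvCountP_lt {α : Type} (p q : α → Bool) (hmono : ∀ a, q a = true → p a = true)
    (a : α) (hpa : p a = true) (hqa : q a = false) :
    ∀ (l : List α), a ∈ l → l.countP q < l.countP p := by
  intro l
  induction l with
  | nil => intro h; simp at h
  | cons c t ih =>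
    intro hmem
    have hle : t.countP q ≤ t.countP p :=
      List.countP_mono_left (by intro x _ hx; exact hmono x hx)
    rcases List.mem_cons.mp hmem with rfl | hmem
    · simp only [List.countP_cons, hpa, hqa, Bool.false_eq_true, if_true, if_false]
      omega
    · have := ih hmem
      by_cases hq : q c = true
      · simp only [List.countP_cons, hq, hmono c hq, if_true]
        omega
      · simp only [Bool.not_eq_true] at hq
        by_cases hp : p c = true <;>
          simp only [List.countP_cons, hq, hp, Bool.false_eq_true, if_true, if_false] <;>
            omega

lemma pvNotContains (s : PySem.Set (Int × Int)) (p : Int × Int) :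
    (!(PySem.Set.contains s p)) = true ↔ p ∉ s := by
  constructor
  · intro ha hmem
    rw [(PySem.Set.contains_iff s p).mpr hmem] at ha
    simp at ha
  · intro hn
    cases hc : PySem.Set.contains s p
    · simp
    · exact absurd ((PySem.Set.contains_iff s p).mp hc) hn

-- a nonempty new frontier contains a fresh in-bounds cell, so `comp` strictly grows
lemma pvGrowDec (land : List (List Int)) (h w : Int) (seen comp frontier : PySem.Set (Int × Int))
    (hne : dfsAltGrow land h w seen comp frontier ≠ []) :
    dfsUnseen h w (PySem.Set.update comp (dfsAltGrow land h w seen comp frontier)) <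
      dfsUnseen h w comp := by
  obtain ⟨a, ha⟩ := List.exists_mem_of_ne_nil _ hne
  have hfa := ha
  unfold dfsAltGrow at hfa
  rw [PySem.Set.mem_ofList, List.mem_filter] at hfa
  obtain ⟨-, hpred⟩ := hfa
  simp only [Bool.and_eq_true, decide_eq_true_eq] at hpred
  obtain ⟨⟨⟨hinb, hseen⟩, hcomp⟩, -⟩ := hpred
  have hacomp : a ∉ comp := (pvNotContains comp a).mp hcomp
  have hmem : a ∈ (PySem.List.pyRange 0 h 1).flatMap
      (fun y => (PySem.List.pyRange 0 w 1).map (fun x => (y, x))) := by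
    simp only [List.mem_flatMap, List.mem_map]
    exact ⟨a.1, by rw [PySem.List.mem_pyRange_one]; omega,
           a.2, by rw [PySem.List.mem_pyRange_one]; omega, rfl⟩
  unfold dfsUnseen
  refine pvCountP_lt _ _ ?_ a ?_ ?_ _ hmem
  · intro b hb
    rw [pvNotContains] at hb ⊢
    exact fun hmem' => hb ((PySem.Set.mem_update _ _ _).mpr (Or.inl hmem'))
  · rw [pvNotContains]
    exact hacomp
  · cases hc : PySem.Set.contains (PySem.Set.update comp (dfsAltGrow land h w seen comp frontier)) a
    · exact absurd ((pvNotContains _ a).mp (by rw [hc]; rfl))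
        (not_not_intro ((PySem.Set.mem_update _ _ _).mpr (Or.inr ha)))
    · rfl

-- B's `while frontier:` loop; grows `comp` a whole frontier at a time
def dfsAltLoop (land : List (List Int)) (h w : Int)
    (seen comp frontier : PySem.Set (Int × Int)) : PySem.Set (Int × Int) :=
  if frontier = [] then comp
  else
    let f := dfsAltGrow land h w seen comp frontier
    dfsAltLoop land h w seen (PySem.Set.update comp f) f
  termination_by 2 * dfsUnseen h w comp + (if frontier = [] then 0 else 1)
  decreasing_by
    rw [if_neg (show ¬ frontier = [] by assumption)]
    by_cases hf : dfsAltGrow land h w seen comp frontier = []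
    · rw [if_pos hf, hf, PySem.Set.update_nil]
      omega
    · have := pvGrowDec land h w seen comp frontier hf
      rw [if_neg hf]
      omega

-- `acc[to_x] += size`
def dfsAltBump (acc : List Int) (i v : Int) : List Int :=
  PySem.List.pySetD acc i (PySem.List.pyGetD acc i 0 + v)

def dfs_alt (land : List (List Int)) : List Int :=
  match land with
  | [] => []  -- Python raises IndexError on `land[0]` here; excluded by Pre_dfs
  | r0 :: _ =>
    let h : Int := land.length
    let w : Int := r0.length
    ((PySem.List.pyRange 0 w 1).foldl (fun st x =>
      (PySem.List.pyRange 0 h 1).foldl (fun (st : PySem.Set (Int × Int) × List Int) y =>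
        if (y, x) ∈ st.1 ∨ dfsLandAt land y x = some 0 then st
        else
          let comp := dfsAltLoop land h w st.1 [(y, x)] [(y, x)]
          -- `min(cols)` / `max(cols)`: `cols` is nonempty (the start cell is in `comp`),
          -- so the `.getD 0` defaults are unreachable
          (PySem.Set.update st.1 comp,
            (PySem.List.pyRange
              ((PySem.List.min? (comp.map (fun c => c.2)) (fun v => v)).getD 0)
              (((PySem.List.max? (comp.map (fun c => c.2)) (fun v => v)).getD 0) + 1) 1).foldl
              (fun a i => dfsAltBump a i (comp.length : Int)) st.2)) st)
      (PySem.Set.empty, List.replicate w.toNat (0 : Int))).2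

-- ===== PRECONDITION & SPEC =====
-- Pre_dfs excludes exactly the inputs on which the Python A raises IndexError: the empty grid
-- (`land[0]`), and grids where some row is shorter than row 0 (every cell of the h×len(land[0])
-- rectangle is eventually indexed).
def Pre_dfs (land : List (List Int)) : Prop :=
  land ≠ [] ∧ ∀ row ∈ land, land.headI.length ≤ row.length
instance (land : List (List Int)) : Decidable (Pre_dfs land) := by unfold Pre_dfs; infer_instance

def pvWitness_dfs : List (List Int) := [[1, 0, 1], [1, 1, 0]]

def Spec_dfs (land : List (List Int)) (out : List Int) : Prop := out = dfs_alt land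
instance (land : List (List Int)) (out : List Int) : Decidable (Spec_dfs land out) := by
  unfold Spec_dfs; infer_instance

-- ===== CLAIM (what is proved, stated in full; the proofs are below) =====
def Claim_equal_dfs : Prop := ∀ (land : List (List Int)), Dom_dfs land → Pre_dfs land →
  Spec_dfs land (dfs land)

-- ===== LEMMAS AND PROOFS =====

/-! Abstract description shared by both proofs: a component walk starting at `s` with already-visited
set `S` marks exactly the cells reachable from `s` through in-bounds value-1 cells not in `S`. -/

def pvInb (h w : Int) (p : Int × Int) : Prop := 0 ≤ p.1 ∧ p.1 < h ∧ 0 ≤ p.2 ∧ p.2 < w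

def pvAdj (p q : Int × Int) : Prop :=
  q = (p.1 + 1, p.2) ∨ q = (p.1 - 1, p.2) ∨ q = (p.1, p.2 + 1) ∨ q = (p.1, p.2 - 1)

def pvOk (land : List (List Int)) (h w : Int) (q : Int × Int) : Prop :=
  pvInb h w q ∧ dfsLandAt land q.1 q.2 = some 1

def pvStepR (land : List (List Int)) (h w : Int) (S : Set (Int × Int)) (p q : Int × Int) : Prop :=
  pvAdj p q ∧ pvOk land h w q ∧ q ∉ S

def pvReach (land : List (List Int)) (h w : Int) (S : Set (Int × Int)) (s q : Int × Int) : Prop :=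
  Relation.ReflTransGen (pvStepR land h w S) s q

/-- two visited sets agreeing on oil cells yield the same reachability -/
lemma pvReach_congr {land : List (List Int)} {h w : Int} {S S' : Set (Int × Int)}
    (hSS : ∀ q, pvOk land h w q → (q ∈ S ↔ q ∈ S')) (s q : Int × Int) :
    pvReach land h w S s q ↔ pvReach land h w S' s q := by
  have hstep : ∀ p r, pvStepR land h w S p r ↔ pvStepR land h w S' p r := by
    intro p r
    unfold pvStepR
    constructor
    · rintro ⟨a, b, c⟩; exact ⟨a, b, fun hx => c ((hSS r b).mpr hx)⟩
    · rintro ⟨a, b, c⟩; exact ⟨a, b, fun hx => c ((hSS r b).mp hx)⟩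
  constructor
  · exact Relation.ReflTransGen.mono (fun a b hab => (hstep a b).mp hab)
  · exact Relation.ReflTransGen.mono (fun a b hab => (hstep a b).mpr hab)

/-- Loop invariant of both component walks: `M` are the marked cells of the component so far,
`W` the marked-but-unprocessed worklist/frontier cells. -/
structure PvInv (land : List (List Int)) (h w : Int) (S : Set (Int × Int)) (s : Int × Int)
    (M : Finset (Int × Int)) (W : Finset (Int × Int)) : Prop where
  hs : s ∈ M
  hsub : ∀ q ∈ M, pvReach land h w S s q
  hW : W ⊆ M
  hinb : ∀ q ∈ M, pvInb h w q
  hclosed : ∀ p ∈ M, p ∉ W → ∀ q, pvAdj p q → pvOk land h w q → q ∈ S ∨ q ∈ M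

def pvIsMin (M : Finset (Int × Int)) (m : Int) : Prop := (∃ p ∈ M, p.2 = m) ∧ ∀ p ∈ M, m ≤ p.2
def pvIsMax (M : Finset (Int × Int)) (m : Int) : Prop := (∃ p ∈ M, p.2 = m) ∧ ∀ p ∈ M, p.2 ≤ m

lemma pvIsMin_unique {M : Finset (Int × Int)} {a b : Int} (ha : pvIsMin M a) (hb : pvIsMin M b) :
    a = b := by
  obtain ⟨⟨p, hp, hpa⟩, hba⟩ := ha
  obtain ⟨⟨r, hr, hrb⟩, hbb⟩ := hb
  have h1 := hba r hr
  have h2 := hbb p hp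
  omega

lemma pvIsMax_unique {M : Finset (Int × Int)} {a b : Int} (ha : pvIsMax M a) (hb : pvIsMax M b) :
    a = b := by
  obtain ⟨⟨p, hp, hpa⟩, hba⟩ := ha
  obtain ⟨⟨r, hr, hrb⟩, hbb⟩ := hb
  have h1 := hba r hr
  have h2 := hbb p hp
  omega

lemma pvIsMin_insert {M : Finset (Int × Int)} {mn : Int} (h : pvIsMin M mn) (q : Int × Int) :
    pvIsMin (insert q M) (min mn q.2) := by
  obtain ⟨⟨p, hp, hpa⟩, hb⟩ := h
  constructor
  · rcases min_choice mn q.2 with hc | hc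
    · exact ⟨p, Finset.mem_insert_of_mem hp, by omega⟩
    · exact ⟨q, Finset.mem_insert_self _ _, hc.symm⟩
  · intro r hr
    rcases Finset.mem_insert.mp hr with rfl | hr
    · exact min_le_right _ _
    · exact le_trans (min_le_left _ _) (hb r hr)

lemma pvIsMax_insert {M : Finset (Int × Int)} {mx : Int} (h : pvIsMax M mx) (q : Int × Int) :
    pvIsMax (insert q M) (max mx q.2) := by
  obtain ⟨⟨p, hp, hpa⟩, hb⟩ := h
  constructor
  · rcases max_choice mx q.2 with hc | hc
    · exact ⟨p, Finset.mem_insert_of_mem hp, by omega⟩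
    · exact ⟨q, Finset.mem_insert_self _ _, hc.symm⟩
  · intro r hr
    rcases Finset.mem_insert.mp hr with rfl | hr
    · exact le_max_right _ _
    · exact le_trans (hb r hr) (le_max_left _ _)

lemma pvInv_init (land : List (List Int)) (h w : Int) (S : Set (Int × Int)) (s : Int × Int)
    (hinb : pvInb h w s) : PvInv land h w S s {s} {s} where
  hs := Finset.mem_singleton_self s
  hsub := by intro q hq; rw [Finset.mem_singleton] at hq; subst hq; exact Relation.ReflTransGen.refl
  hW := Finset.Subset.refl _
  hinb := by intro q hq; rw [Finset.mem_singleton] at hq; subst hq; exact hinb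
  hclosed := by
    intro p hp hnp
    rw [Finset.mem_singleton] at hp
    exact absurd (hp ▸ Finset.mem_singleton_self p) (by simpa [hp] using hnp)

lemma pvInv_step {land : List (List Int)} {h w : Int} {S : Set (Int × Int)} {s : Int × Int}
    {M W : Finset (Int × Int)} (inv : PvInv land h w S s M W) {c : Int × Int} (hc : c ∈ W)
    {N : Finset (Int × Int)}
    (hN : ∀ q, q ∈ N ↔ pvAdj c q ∧ pvOk land h w q ∧ ¬(q ∈ S ∨ q ∈ ↑M)) :
    PvInv land h w S s (M ∪ N) ((W.erase c) ∪ N) where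
  hs := Finset.mem_union_left _ inv.hs
  hsub := by
    intro q hq
    rcases Finset.mem_union.mp hq with hq | hq
    · exact inv.hsub q hq
    · obtain ⟨hadj, hok, hns⟩ := (hN q).mp hq
      exact Relation.ReflTransGen.tail (inv.hsub c (inv.hW hc))
        ⟨hadj, hok, fun hS => hns (Or.inl hS)⟩
  hW := by
    intro q hq
    rcases Finset.mem_union.mp hq with hq | hq
    · exact Finset.mem_union_left _ (inv.hW (Finset.mem_of_mem_erase hq))
    · exact Finset.mem_union_right _ hq
  hinb := by
    intro q hq
    rcases Finset.mem_union.mp hq with hq | hq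
    · exact inv.hinb q hq
    · exact ((hN q).mp hq).2.1.1
  hclosed := by
    intro p hp hnp q hadj hok
    have hpq : p ∉ N := fun hpN => hnp (Finset.mem_union_right _ hpN)
    rcases Finset.mem_union.mp hp with hpM | hpM
    swap
    · exact absurd hpM hpq
    by_cases hpc : p = c
    · subst hpc
      by_cases hq : q ∈ S ∨ q ∈ ↑M
      · rcases hq with hq | hq
        · exact Or.inl hq
        · exact Or.inr (Finset.mem_union_left _ (by exact_mod_cast hq))
      · exact Or.inr (Finset.mem_union_right _ ((hN q).mpr ⟨hadj, hok, hq⟩))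
    · have hpW : p ∉ W := fun hpW =>
        hnp (Finset.mem_union_left _ (Finset.mem_erase.mpr ⟨hpc, hpW⟩))
      rcases inv.hclosed p hpM hpW q hadj hok with hq | hq
      · exact Or.inl hq
      · exact Or.inr (Finset.mem_union_left _ hq)

/-- B's level step: expanding the WHOLE frontier at once preserves the invariant -/
lemma pvInv_level {land : List (List Int)} {h w : Int} {S : Set (Int × Int)} {s : Int × Int}
    {M W : Finset (Int × Int)} (inv : PvInv land h w S s M W) {N : Finset (Int × Int)}
    (hN : ∀ q, q ∈ N ↔ (∃ p ∈ W, pvAdj p q) ∧ pvOk land h w q ∧ ¬(q ∈ S ∨ q ∈ ↑M)) :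
    PvInv land h w S s (M ∪ N) N where
  hs := Finset.mem_union_left _ inv.hs
  hsub := by
    intro q hq
    rcases Finset.mem_union.mp hq with hq | hq
    · exact inv.hsub q hq
    · obtain ⟨⟨p, hpW, hadj⟩, hok, hns⟩ := (hN q).mp hq
      exact Relation.ReflTransGen.tail (inv.hsub p (inv.hW hpW))
        ⟨hadj, hok, fun hS => hns (Or.inl hS)⟩
  hW := Finset.subset_union_right
  hinb := by
    intro q hq
    rcases Finset.mem_union.mp hq with hq | hq
    · exact inv.hinb q hq
    · exact ((hN q).mp hq).2.1.1
  hclosed := by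
    intro p hp hnp q hadj hok
    rcases Finset.mem_union.mp hp with hpM | hpM
    swap
    · exact absurd hpM hnp
    by_cases hq : q ∈ S ∨ q ∈ ↑M
    · rcases hq with hq | hq
      · exact Or.inl hq
      · exact Or.inr (Finset.mem_union_left _ (by exact_mod_cast hq))
    · by_cases hpW : p ∈ W
      · exact Or.inr (Finset.mem_union_right _ ((hN q).mpr ⟨⟨p, hpW, hadj⟩, hok, hq⟩))
      · rcases inv.hclosed p hpM hpW q hadj hok with hq' | hq'
        · exact Or.inl hq'
        · exact Or.inr (Finset.mem_union_left _ hq')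

lemma pvInv_final {land : List (List Int)} {h w : Int} {S : Set (Int × Int)} {s : Int × Int}
    {M : Finset (Int × Int)} (inv : PvInv land h w S s M ∅) :
    ∀ q, q ∈ M ↔ pvReach land h w S s q := by
  intro q
  constructor
  · exact inv.hsub q
  · intro hreach
    induction hreach with
    | refl => exact inv.hs
    | tail _ hstep ih =>
      rename_i p q hpr
      obtain ⟨hadj, hok, hns⟩ := hstep
      rcases inv.hclosed p ih (Finset.notMem_empty p) q hadj hok with hq | hq
      · exact absurd hq hns
      · exact hq

/-- the final component does not depend on how it was walked, nor on dead (non-oil) visited cells -/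
lemma pvInv_unique {land : List (List Int)} {h w : Int} {S S' : Set (Int × Int)} {s : Int × Int}
    {M₁ M₂ : Finset (Int × Int)} (hSS : ∀ q, pvOk land h w q → (q ∈ S ↔ q ∈ S'))
    (h₁ : PvInv land h w S s M₁ ∅) (h₂ : PvInv land h w S' s M₂ ∅) :
    M₁ = M₂ := by
  ext q
  rw [pvInv_final h₁, pvInv_final h₂, pvReach_congr hSS]


/-! A-side concrete↔abstract bridge: the visited matrix viewed as a set of cells. -/

def pvRepA (h w : Int) (v : List (List Bool)) (T : Set (Int × Int)) : Prop :=
  (∀ p : Int × Int, pvInb h w p → ∃ b, dfsGet2d v p.1 p.2 = some b) ∧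
  (∀ p : Int × Int, pvInb h w p → (dfsGet2d v p.1 p.2 = some true ↔ p ∈ T))

lemma pvRepA_congr {h w : Int} {v : List (List Bool)} {T T' : Set (Int × Int)}
    (hr : pvRepA h w v T) (he : ∀ p, p ∈ T ↔ p ∈ T') : pvRepA h w v T' :=
  ⟨hr.1, fun p hp => (hr.2 p hp).trans (he p)⟩

lemma pvRepA_false {h w : Int} {v : List (List Bool)} {T : Set (Int × Int)}
    (hr : pvRepA h w v T) {p : Int × Int} (hp : pvInb h w p) :
    (dfsGet2d v p.1 p.2 = some false ↔ p ∉ T) := by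
  obtain ⟨b, hb⟩ := hr.1 p hp
  have hiff := hr.2 p hp
  rw [hb] at hiff ⊢
  cases b
  · constructor
    · intro _ hT
      have := hiff.mpr hT
      simp at this
    · intro _; trivial
  · constructor
    · intro hft; simp at hft
    · intro hT; exact absurd (hiff.mp rfl) hT

lemma pvGet2d_set2d {v : List (List Bool)} {q : Int × Int} (p : Int × Int)
    (hq1 : 0 ≤ q.1) (hq2 : 0 ≤ q.2) (hp1 : 0 ≤ p.1) (hp2 : 0 ≤ p.2)
    (hdef : ∃ b, dfsGet2d v q.1 q.2 = some b) :
    dfsGet2d (dfsSet2d v q.1 q.2) p.1 p.2 = if p = q then some true else dfsGet2d v p.1 p.2 := by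
  obtain ⟨b, hb⟩ := hdef
  unfold dfsGet2d at hb ⊢
  unfold dfsSet2d
  rw [PySem.List.pyGet?_of_nonneg v hq1] at hb
  cases hr : v[q.1.toNat]? with
  | none => rw [hr] at hb; simp at hb
  | some r =>
    rw [hr] at hb
    simp only [Option.bind_some] at hb
    rw [PySem.List.pyGet?_of_nonneg r hq2] at hb
    have hrq : q.1.toNat < v.length := (List.getElem?_eq_some_iff.mp hr).1
    have hcq : q.2.toNat < r.length := (List.getElem?_eq_some_iff.mp hb).1
    have hgd : v.getD q.1.toNat [] = r := by simp [List.getD, hr]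
    rw [hgd]
    rw [PySem.List.pyGet?_of_nonneg (v.set q.1.toNat (r.set q.2.toNat true)) hp1,
        PySem.List.pyGet?_of_nonneg v hp1]
    by_cases hy : p.1 = q.1
    · rw [hy, List.getElem?_set_self hrq, hr]
      simp only [Option.bind_some]
      rw [PySem.List.pyGet?_of_nonneg (r.set q.2.toNat true) hp2,
          PySem.List.pyGet?_of_nonneg r hp2]
      by_cases hx : p.2 = q.2
      · have hpq : p = q := Prod.ext hy hx
        rw [if_pos hpq, hx, List.getElem?_set_self hcq]
      · have hne : p ≠ q := fun hpq => hx (by rw [hpq])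
        rw [if_neg hne, List.getElem?_set_ne (by omega)]
    · have hne : p ≠ q := fun hpq => hy (by rw [hpq])
      rw [if_neg hne, List.getElem?_set_ne (by omega)]

lemma pvRepA_insert {h w : Int} {v : List (List Bool)} {T : Set (Int × Int)}
    (hr : pvRepA h w v T) {q : Int × Int} (hq : pvInb h w q) :
    pvRepA h w (dfsSet2d v q.1 q.2) (T ∪ {q}) := by
  have hdef := hr.1 q hq
  constructor
  · intro p hp
    rw [pvGet2d_set2d p hq.1 hq.2.2.1 hp.1 hp.2.2.1 hdef]
    split
    · exact ⟨true, rfl⟩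
    · exact hr.1 p hp
  · intro p hp
    rw [pvGet2d_set2d p hq.1 hq.2.2.1 hp.1 hp.2.2.1 hdef]
    by_cases hpq : p = q
    · rw [if_pos hpq]
      simp [hpq]
    · rw [if_neg hpq]
      rw [hr.2 p hp]
      simp [hpq]


lemma pvFoldA_spec (land : List (List Int)) (h w : Int) (S : Set (Int × Int)) :
    ∀ (l : List (Int × Int)), l.Nodup →
    ∀ (v : List (List Bool)) (W : List (Int × Int)) (mn mx cnt : Int) (M : Finset (Int × Int)),
    pvRepA h w v (S ∪ ↑M) →
    ∃ (v' : List (List Bool)) (P : List (Int × Int)) (N : Finset (Int × Int)) (mn' mx' : Int),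
      l.foldl (dfsStep land h w) (v, W, mn, mx, cnt) =
        (v', P ++ W, mn', mx', cnt + (N.card : Int)) ∧
      (∀ q, q ∈ N ↔ q ∈ l ∧ pvOk land h w q ∧ ¬(q ∈ S ∨ q ∈ ↑M)) ∧
      P.Nodup ∧ P.toFinset = N ∧
      pvRepA h w v' (S ∪ ↑(M ∪ N)) ∧
      (pvIsMin M mn → pvIsMin (M ∪ N) mn') ∧ (pvIsMax M mx → pvIsMax (M ∪ N) mx') := by
  intro l
  induction l with
  | nil =>
    intro _ v W mn mx cnt M hRep
    refine ⟨v, [], ∅, mn, mx, by simp, by simp, by simp, by simp, by simpa using hRep,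
      by simpa using id, by simpa using id⟩
  | cons q l ih =>
    intro hnd v W mn mx cnt M hRep
    obtain ⟨hql, hndl⟩ := List.nodup_cons.mp hnd
    simp only [List.foldl_cons]
    by_cases hG : (0 ≤ q.2 ∧ q.2 < w ∧ 0 ≤ q.1 ∧ q.1 < h ∧
        dfsGet2d v q.1 q.2 = some false ∧ dfsLandAt land q.1 q.2 = some 1)
    · have hstep : dfsStep land h w (v, W, mn, mx, cnt) q =
          (dfsSet2d v q.1 q.2, q :: W, min mn q.2, max mx q.2, cnt + 1) := by
        unfold dfsStep; rw [if_pos hG]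
      rw [hstep]
      have hqInb : pvInb h w q := ⟨hG.2.2.1, hG.2.2.2.1, hG.1, hG.2.1⟩
      have hqOk : pvOk land h w q := ⟨hqInb, hG.2.2.2.2.2⟩
      have hqNot : ¬(q ∈ S ∨ q ∈ ↑M) := by
        have := (pvRepA_false hRep hqInb).mp hG.2.2.2.2.1
        simp [Set.mem_union] at this
        tauto
      have hRep' : pvRepA h w (dfsSet2d v q.1 q.2) (S ∪ ↑(insert q M)) := by
        refine pvRepA_congr (pvRepA_insert hRep hqInb) ?_
        intro p
        simp only [Set.mem_union, Set.mem_singleton_iff, Finset.coe_insert,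
          Set.mem_insert_iff, Finset.mem_coe]
        tauto
      obtain ⟨v', P', N', mn', mx', heq, hchar, hndP, htfP, hrep2, hmin2, hmax2⟩ :=
        ih hndl (dfsSet2d v q.1 q.2) (q :: W) (min mn q.2) (max mx q.2) (cnt + 1)
          (insert q M) hRep'
      have hqN' : q ∉ N' := by
        intro hq
        exact ((hchar q).mp hq).2.2 (Or.inr (by simp))
      have hsetEq : insert q M ∪ N' = M ∪ insert q N' := by
        ext r; simp only [Finset.mem_union, Finset.mem_insert]; tauto
      refine ⟨v', P' ++ [q], insert q N', mn', mx', ?_, ?_, ?_, ?_, ?_, ?_, ?_⟩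
      · have hl1 : P' ++ q :: W = (P' ++ [q]) ++ W := by simp
        have hc1 : cnt + 1 + (N'.card : Int) = cnt + ((insert q N').card : Int) := by
          rw [Finset.card_insert_of_notMem hqN']; push_cast; ring
        rw [heq, hl1, hc1]
      · intro q'
        rw [Finset.mem_insert, hchar q']
        constructor
        · rintro (rfl | ⟨hl, hok, hns⟩)
          · exact ⟨List.mem_cons_self, hqOk, hqNot⟩
          · refine ⟨List.mem_cons_of_mem _ hl, hok, fun hc => hns ?_⟩
            rcases hc with hc | hc
            · exact Or.inl hc
            · exact Or.inr (Finset.mem_insert_of_mem hc)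
        · rintro ⟨hmem, hok, hns⟩
          rcases List.mem_cons.mp hmem with rfl | hl
          · exact Or.inl rfl
          · have hqq : q' ≠ q := fun hqq => hql (hqq ▸ hl)
            refine Or.inr ((⟨hl, hok, fun hc => hns ?_⟩ : _ ∧ _ ∧ _))
            rcases hc with hc | hc
            · exact Or.inl hc
            · rcases Finset.mem_insert.mp hc with hc | hc
              · exact absurd hc hqq
              · exact Or.inr hc
      · have hqP' : q ∉ P' := fun hq => hqN' (htfP ▸ List.mem_toFinset.mpr hq)
        refine List.Nodup.append hndP (List.nodup_singleton q) ?_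
        intro a ha hb
        rw [List.mem_singleton] at hb
        exact hqP' (hb ▸ ha)
      · rw [List.toFinset_append, htfP]
        rw [show (([q] : List (Int × Int)).toFinset) = {q} from rfl]
        rw [Finset.union_comm, Finset.singleton_union]
      · exact pvRepA_congr hrep2 (by
          intro p
          simp only [Set.mem_union, Finset.mem_coe, hsetEq])
      · intro hmn
        exact hsetEq ▸ hmin2 (pvIsMin_insert hmn q)
      · intro hmx
        exact hsetEq ▸ hmax2 (pvIsMax_insert hmx q)
    · have hstep : dfsStep land h w (v, W, mn, mx, cnt) q = (v, W, mn, mx, cnt) := by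
        unfold dfsStep; rw [if_neg hG]
      rw [hstep]
      obtain ⟨v', P', N', mn', mx', heq, hchar, hndP, htfP, hrep2, hmin2, hmax2⟩ :=
        ih hndl v W mn mx cnt M hRep
      have hqNo : ¬(pvOk land h w q ∧ ¬(q ∈ S ∨ q ∈ ↑M)) := by
        rintro ⟨hok, hns⟩
        exact hG ⟨hok.1.2.2.1, hok.1.2.2.2, hok.1.1, hok.1.2.1,
          (pvRepA_false hRep hok.1).mpr (by simpa [Set.mem_union] using hns), hok.2⟩
      refine ⟨v', P', N', mn', mx', heq, ?_, hndP, htfP, hrep2, hmin2, hmax2⟩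
      intro q'
      rw [hchar q']
      constructor
      · rintro ⟨hl, hok, hns⟩
        exact ⟨List.mem_cons_of_mem _ hl, hok, hns⟩
      · rintro ⟨hmem, hok, hns⟩
        rcases List.mem_cons.mp hmem with rfl | hl
        · exact absurd ⟨hok, hns⟩ hqNo
        · exact ⟨hl, hok, hns⟩

lemma pvNbsA_mem (c q : Int × Int) :
    q ∈ [(c.1 + 1, c.2), (c.1 - 1, c.2), (c.1, c.2 + 1), (c.1, c.2 - 1)] ↔ pvAdj c q := by
  simp [pvAdj]

lemma pvNbsA_nodup (c : Int × Int) :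
    ([(c.1 + 1, c.2), (c.1 - 1, c.2), (c.1, c.2 + 1), (c.1, c.2 - 1)]).Nodup := by
  simp [Prod.ext_iff]
  omega

lemma pvLoopA_spec (land : List (List Int)) (h w : Int) (S : Set (Int × Int)) (s : Int × Int) :
    ∀ (n : Nat) (v : List (List Bool)) (W : List (Int × Int)) (mn mx cnt : Int)
      (M : Finset (Int × Int)),
    5 * dfsFalse v + W.length < n →
    pvRepA h w v (S ∪ ↑M) → W.Nodup → PvInv land h w S s M W.toFinset →
    cnt = (M.card : Int) → pvIsMin M mn → pvIsMax M mx →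
    ∃ (vf : List (List Bool)) (Mf : Finset (Int × Int)) (mnf mxf : Int),
      dfsLoop land h w (v, W, mn, mx, cnt) = (vf, mnf, mxf, (Mf.card : Int)) ∧
      PvInv land h w S s Mf ∅ ∧ pvRepA h w vf (S ∪ ↑Mf) ∧ pvIsMin Mf mnf ∧ pvIsMax Mf mxf := by
  intro n
  induction n with
  | zero => intro v W mn mx cnt M hlt; omega
  | succ n ihn =>
    intro v W mn mx cnt M hlt hRep hndW hInv hcnt hmn hmx
    cases W with
    | nil =>
      rw [dfsLoop.eq_1, hcnt]
      refine ⟨v, M, mn, mx, rfl, ?_, hRep, hmn, hmx⟩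
      have : ([] : List (Int × Int)).toFinset = ∅ := rfl
      exact this ▸ hInv
    | cons c rest =>
      obtain ⟨hcrest, hndrest⟩ := List.nodup_cons.mp hndW
      obtain ⟨v', P, N, mn', mx', heq, hchar, hndP, htfP, hrep', hminf, hmaxf⟩ :=
        pvFoldA_spec land h w S _ (pvNbsA_nodup c) v rest mn mx cnt M hRep
      have hcW : c ∈ (c :: rest).toFinset := by simp
      have hNchar : ∀ q, q ∈ N ↔ pvAdj c q ∧ pvOk land h w q ∧ ¬(q ∈ S ∨ q ∈ M) := by
        intro q
        rw [hchar q, pvNbsA_mem]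
      have hinv' := pvInv_step hInv hcW (N := N) hNchar
      have hNM : Disjoint M N :=
        Finset.disjoint_left.mpr (fun a haM haN => ((hNchar a).mp haN).2.2 (Or.inr haM))
      have hWtf : (P ++ rest).toFinset = ((c :: rest).toFinset.erase c) ∪ N := by
        have h1 : (c :: rest).toFinset.erase c = rest.toFinset := by
          rw [List.toFinset_cons, Finset.erase_insert_eq_erase,
            Finset.erase_eq_of_notMem (by simpa using hcrest)]
        rw [h1, List.toFinset_append, htfP, Finset.union_comm]
      have hndPr : (P ++ rest).Nodup := by
        refine List.Nodup.append hndP hndrest ?_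
        intro a haP haRest
        have haN : a ∈ N := htfP ▸ List.mem_toFinset.mpr haP
        have haM : a ∈ M := hInv.hW (by simp [List.mem_toFinset.mpr haRest])
        exact ((hNchar a).mp haN).2.2 (Or.inr haM)
      have hcnt' : cnt + (N.card : Int) = (((M ∪ N).card : Nat) : Int) := by
        rw [Finset.card_union_of_disjoint hNM, hcnt]
        push_cast
        ring
      have hmeas := pvFold_measure land h w
        [(c.1 + 1, c.2), (c.1 - 1, c.2), (c.1, c.2 + 1), (c.1, c.2 - 1)]
        (v, rest, mn, mx, cnt)
      rw [heq] at hmeas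
      dsimp only at hmeas
      have hlt' : 5 * dfsFalse v' + (P ++ rest).length < n := by
        simp only [List.length_cons] at hlt
        omega
      obtain ⟨vf, Mf, mnf, mxf, hfin, hinvf, hrepf, hminff, hmaxff⟩ :=
        ihn v' (P ++ rest) mn' mx' (cnt + (N.card : Int)) (M ∪ N) hlt' hrep' hndPr
          (hWtf ▸ hinv') hcnt' (hminf hmn) (hmaxf hmx)
      refine ⟨vf, Mf, mnf, mxf, ?_, hinvf, hrepf, hminff, hmaxff⟩
      rw [dfsLoop.eq_2, heq]
      exact hfin


/-! B-side: the grow step and the level loop compute the same abstract component. -/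

lemma pvNbsB_mem (c q : Int × Int) : q ∈ dfsAltNbrs c ↔ pvAdj c q := by
  simp [dfsAltNbrs, pvAdj]

lemma pvGrow_mem (land : List (List Int)) (h w : Int)
    (seen comp frontier : PySem.Set (Int × Int)) (q : Int × Int) :
    q ∈ dfsAltGrow land h w seen comp frontier ↔
      (∃ p ∈ frontier, pvAdj p q) ∧ pvOk land h w q ∧ q ∉ seen ∧ q ∉ comp := by
  unfold dfsAltGrow
  rw [PySem.Set.mem_ofList, List.mem_filter, List.mem_flatMap]
  simp only [Bool.and_eq_true, decide_eq_true_eq]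
  constructor
  · rintro ⟨⟨p, hp, hnb⟩, ⟨⟨⟨hb, hsn⟩, hcp⟩, hl⟩⟩
    exact ⟨⟨p, hp, (pvNbsB_mem p q).mp hnb⟩, ⟨⟨hb.1, hb.2.1, hb.2.2.1, hb.2.2.2⟩, hl⟩,
      (pvNotContains seen q).mp hsn, (pvNotContains comp q).mp hcp⟩
  · rintro ⟨⟨p, hp, hadj⟩, ⟨hinb, hl⟩, hsn, hcp⟩
    exact ⟨⟨p, hp, (pvNbsB_mem p q).mpr hadj⟩,
      ⟨⟨⟨hinb.1, hinb.2.1, hinb.2.2.1, hinb.2.2.2⟩, (pvNotContains seen q).mpr hsn⟩,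
        (pvNotContains comp q).mpr hcp⟩, hl⟩

lemma pvLoopB_spec (land : List (List Int)) (h w : Int) (S : Set (Int × Int)) (s : Int × Int) :
    ∀ (n : Nat) (seen comp frontier : PySem.Set (Int × Int)) (M W : Finset (Int × Int)),
    2 * dfsUnseen h w comp + (if frontier = [] then 0 else 1) < n →
    (∀ p : Int × Int, p ∈ seen ↔ p ∈ S) →
    comp.Nodup → comp.toFinset = M →
    (∀ p : Int × Int, p ∈ frontier ↔ p ∈ W) →
    PvInv land h w S s M W →
    ∃ (Mf : Finset (Int × Int)),
      (dfsAltLoop land h w seen comp frontier).Nodup ∧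
      (dfsAltLoop land h w seen comp frontier).toFinset = Mf ∧
      PvInv land h w S s Mf ∅ := by
  intro n
  induction n with
  | zero => intro seen comp frontier M W hlt; omega
  | succ n ihn =>
    intro seen comp frontier M W hlt hseen hnd htf hfr hInv
    by_cases hemp : frontier = []
    · rw [dfsAltLoop, if_pos hemp]
      have hWemp : W = ∅ := by
        refine Finset.eq_empty_of_forall_notMem (fun p hp => ?_)
        have := (hfr p).mpr hp
        rw [hemp] at this
        exact absurd this (List.not_mem_nil)
      exact ⟨M, hnd, htf, hWemp ▸ hInv⟩
    · rw [dfsAltLoop, if_neg hemp]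
      set f := dfsAltGrow land h w seen comp frontier with hf
      have hfnd : f.Nodup := PySem.Set.nodup_ofList _
      have hNchar : ∀ q, q ∈ f.toFinset ↔
          (∃ p ∈ W, pvAdj p q) ∧ pvOk land h w q ∧ ¬(q ∈ S ∨ q ∈ ↑M) := by
        intro q
        rw [List.mem_toFinset, hf, pvGrow_mem]
        constructor
        · rintro ⟨⟨p, hp, hadj⟩, hok, hsn, hcp⟩
          refine ⟨⟨p, (hfr p).mp hp, hadj⟩, hok, ?_⟩
          rintro (hq | hq)
          · exact hsn ((hseen q).mpr hq)
          · exact hcp (List.mem_toFinset.mp (htf ▸ (by exact_mod_cast hq)))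
        · rintro ⟨⟨p, hp, hadj⟩, hok, hns⟩
          refine ⟨⟨p, (hfr p).mpr hp, hadj⟩, hok, ?_, ?_⟩
          · exact fun hq => hns (Or.inl ((hseen q).mp hq))
          · exact fun hq => hns (Or.inr (by exact_mod_cast htf ▸ List.mem_toFinset.mpr hq))
      have hinv' := pvInv_level hInv (N := f.toFinset) hNchar
      have hnd' : (PySem.Set.update comp f).Nodup := PySem.Set.nodup_update comp f hnd
      have htf' : (PySem.Set.update comp f).toFinset = M ∪ f.toFinset := by
        ext q
        rw [List.mem_toFinset, PySem.Set.mem_update, Finset.mem_union, List.mem_toFinset,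
          ← htf, List.mem_toFinset]
      have hlt' : 2 * dfsUnseen h w (PySem.Set.update comp f) + (if f = [] then 0 else 1) < n := by
        rw [if_neg hemp] at hlt
        by_cases hfe : f = []
        · rw [if_pos hfe, hfe, PySem.Set.update_nil]
          omega
        · have hge : dfsAltGrow land h w seen comp frontier = [] → False := by
            rw [← hf]; exact hfe
          have hdec := pvGrowDec land h w seen comp frontier hge
          rw [← hf] at hdec
          rw [if_neg hfe]
          omega
      exact ihn seen (PySem.Set.update comp f) f (M ∪ f.toFinset) f.toFinset hlt' hseen hnd' htf'
        (fun p => (List.mem_toFinset (a := p)).symm) hinv'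

lemma pvBump_eq : dfsBump = dfsAltBump := rfl

/-- proof-side name for A's per-cell outer-loop body (definitionally the lambda inside `dfs`) -/
def pvBodyA (land : List (List Int)) (h w x : Int)
    (st : List (List Bool) × List Int) (y : Int) : List (List Bool) × List Int :=
  if dfsGet2d st.1 y x = some true then st
  else
    if dfsLandAt land y x = some 0 then (dfsSet2d st.1 y x, st.2)
    else
      ((dfsLoop land h w (dfsSet2d st.1 y x, [(y, x)], x, x, 1)).1,
        (PySem.List.pyRange (dfsLoop land h w (dfsSet2d st.1 y x, [(y, x)], x, x, 1)).2.1
          ((dfsLoop land h w (dfsSet2d st.1 y x, [(y, x)], x, x, 1)).2.2.1 + 1) 1).foldl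
          (fun a i => dfsBump a i
            (dfsLoop land h w (dfsSet2d st.1 y x, [(y, x)], x, x, 1)).2.2.2) st.2)

/-- proof-side name for B's per-cell outer-loop body (definitionally the lambda inside `dfs_alt`) -/
def pvBodyB (land : List (List Int)) (h w x : Int)
    (st : PySem.Set (Int × Int) × List Int) (y : Int) : PySem.Set (Int × Int) × List Int :=
  if (y, x) ∈ st.1 ∨ dfsLandAt land y x = some 0 then st
  else
    (PySem.Set.update st.1 (dfsAltLoop land h w st.1 [(y, x)] [(y, x)]),
      (PySem.List.pyRange
        ((PySem.List.min?
          ((dfsAltLoop land h w st.1 [(y, x)] [(y, x)]).map (fun c => c.2)) (fun v => v)).getD 0)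
        (((PySem.List.max?
          ((dfsAltLoop land h w st.1 [(y, x)] [(y, x)]).map (fun c => c.2)) (fun v => v)).getD 0)
          + 1) 1).foldl
        (fun a i => dfsAltBump a i ((dfsAltLoop land h w st.1 [(y, x)] [(y, x)]).length : Int))
        st.2)

/-- Outer relation: A's visited matrix holds B's seen set plus some already-scanned ZERO cells. -/
def pvOuterRel (land : List (List Int)) (h w : Int) (stA : List (List Bool) × List Int)
    (stB : PySem.Set (Int × Int) × List Int) : Prop :=
  ∃ Z : Set (Int × Int),
    (∀ p ∈ Z, dfsLandAt land p.1 p.2 = some 0) ∧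
    pvRepA h w stA.1 ({p : Int × Int | p ∈ stB.1} ∪ Z) ∧
    (∀ p : Int × Int, p ∈ stB.1 → pvInb h w p) ∧
    stA.2 = stB.2

lemma pvBody_rel (land : List (List Int)) (h w x y : Int)
    (hx : 0 ≤ x ∧ x < w) (hy : 0 ≤ y ∧ y < h)
    (stA : List (List Bool) × List Int) (stB : PySem.Set (Int × Int) × List Int)
    (hrel : pvOuterRel land h w stA stB) :
    pvOuterRel land h w (pvBodyA land h w x stA y) (pvBodyB land h w x stB y) := by
  obtain ⟨Z, hZ, hRep, hSin, hacc⟩ := hrel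
  have hinb : pvInb h w (y, x) := ⟨hy.1, hy.2, hx.1, hx.2⟩
  have hvis := hRep.2 (y, x) hinb
  unfold pvBodyA pvBodyB
  by_cases hin : ((y, x) : Int × Int) ∈ stB.1
  · rw [if_pos (hvis.mpr (Or.inl hin)), if_pos (Or.inl hin)]
    exact ⟨Z, hZ, hRep, hSin, hacc⟩
  · by_cases hinZ : ((y, x) : Int × Int) ∈ Z
    · rw [if_pos (hvis.mpr (Or.inr hinZ)), if_pos (Or.inr (hZ _ hinZ))]
      exact ⟨Z, hZ, hRep, hSin, hacc⟩
    · have hAg : ¬ dfsGet2d stA.1 y x = some true := by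
        intro hv
        rcases hvis.mp hv with hv | hv
        · exact hin hv
        · exact hinZ hv
      rw [if_neg hAg]
      by_cases hland : dfsLandAt land y x = some 0
      · rw [if_pos hland, if_pos (Or.inr hland)]
        refine ⟨Z ∪ {((y, x) : Int × Int)}, ?_, ?_, hSin, hacc⟩
        · intro p hp
          rcases hp with hp | hp
          · exact hZ p hp
          · rw [Set.mem_singleton_iff] at hp
            subst hp
            exact hland
        · refine pvRepA_congr (pvRepA_insert hRep hinb) ?_
          intro p
          simp only [Set.mem_union, Set.mem_setOf_eq, Set.mem_singleton_iff]
          tauto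
      · rw [if_neg hland, if_neg (by rintro (hc | hc); exacts [hin hc, hland hc])]
        -- both sides walk the component started at (y, x)
        have htfs : (([((y, x) : Int × Int)]).toFinset) = {((y, x) : Int × Int)} := by simp
        set SB : Set (Int × Int) := {p : Int × Int | p ∈ stB.1} with hSB
        set SA : Set (Int × Int) := SB ∪ Z with hSA
        have hRepA : pvRepA h w stA.1 SA := hRep
        have hInv0A := pvInv_init land h w SA (y, x) hinb
        have hInv0B := pvInv_init land h w SB (y, x) hinb
        have hRepIns : pvRepA h w (dfsSet2d stA.1 y x)
            (SA ∪ ↑({((y, x) : Int × Int)} : Finset (Int × Int))) := by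
          refine pvRepA_congr (pvRepA_insert hRepA hinb) ?_
          intro p
          simp only [Set.mem_union, Set.mem_singleton_iff, Finset.coe_singleton]
        obtain ⟨vf, MfA, mnf, mxf, heqA, invA, repAf, hminA, hmaxA⟩ :=
          pvLoopA_spec land h w SA (y, x)
            (5 * dfsFalse (dfsSet2d stA.1 y x) + 2) (dfsSet2d stA.1 y x) [(y, x)] x x 1
            {((y, x) : Int × Int)} (by simp) hRepIns (by simp) (htfs ▸ hInv0A)
            (by simp) ⟨⟨(y, x), Finset.mem_singleton_self _, rfl⟩,
              by intro p hp; rw [Finset.mem_singleton] at hp; rw [hp]⟩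
            ⟨⟨(y, x), Finset.mem_singleton_self _, rfl⟩,
              by intro p hp; rw [Finset.mem_singleton] at hp; rw [hp]⟩
        obtain ⟨MfB, hndB, htfB, invB⟩ :=
          pvLoopB_spec land h w SB (y, x)
            (2 * dfsUnseen h w [((y, x) : Int × Int)] + 2) stB.1 [(y, x)] [(y, x)]
            {((y, x) : Int × Int)} {((y, x) : Int × Int)} (by simp)
            (fun p => Iff.rfl) (by simp) htfs
            (fun p => by rw [Finset.mem_singleton, List.mem_singleton]) (htfs ▸ hInv0B)
        -- dead cells in Z are never oil, so both walks mark the same component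
        have hSS : ∀ q, pvOk land h w q → (q ∈ SA ↔ q ∈ SB) := by
          intro q hok
          rw [hSA]
          simp only [Set.mem_union]
          constructor
          · rintro (hq | hq)
            · exact hq
            · have := hZ q hq
              rw [hok.2] at this
              exact absurd (Option.some.inj this) (by norm_num)
          · exact Or.inl
        have hMM : MfA = MfB := pvInv_unique hSS invA invB
        set compf := dfsAltLoop land h w stB.1 [((y, x) : Int × Int)] [((y, x) : Int × Int)]
          with hcf
        have hcne : compf ≠ [] := by
          intro hnil
          have := invB.hs
          rw [← htfB, hnil] at this
          simp at this
        have hcard : ((MfA.card : Nat) : Int) = ((compf.length : Nat) : Int) := by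
          rw [hMM, ← htfB, List.toFinset_card_of_nodup hndB]
        -- min/max of the component's columns
        set cols := compf.map (fun c => c.2) with hcols
        have hcolsne : cols ≠ [] := by
          rw [hcols]
          exact fun hc => hcne (List.map_eq_nil_iff.mp hc)
        have hlomem : ∀ z ∈ cols, ∃ p ∈ MfB, p.2 = z := by
          intro z hz
          obtain ⟨p, hp, hpz⟩ := List.mem_map.mp hz
          exact ⟨p, htfB ▸ List.mem_toFinset.mpr hp, hpz⟩
        have hallmem : ∀ p ∈ MfB, p.2 ∈ cols := by
          intro p hp
          exact List.mem_map.mpr ⟨p, List.mem_toFinset.mp (htfB ▸ hp), rfl⟩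
        obtain ⟨lo, hlo⟩ : ∃ lo, PySem.List.min? cols (fun v => v) = some lo := by
          cases hcl : cols with
          | nil => exact absurd hcl hcolsne
          | cons a t => exact ⟨t.foldl min a, by rw [PySem.List.min?_id_cons]⟩
        obtain ⟨hi, hhi⟩ : ∃ hi, PySem.List.max? cols (fun v => v) = some hi := by
          cases hcl : cols with
          | nil => exact absurd hcl hcolsne
          | cons a t => exact ⟨t.foldl max a, by rw [PySem.List.max?_id_cons]⟩
        have hloMin : pvIsMin MfB lo := by
          refine ⟨hlomem lo (PySem.List.min?_mem hlo), fun p hp => ?_⟩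
          exact PySem.List.min?_isMin hlo _ (hallmem p hp)
        have hhiMax : pvIsMax MfB hi := by
          refine ⟨hlomem hi (PySem.List.max?_mem hhi), fun p hp => ?_⟩
          exact PySem.List.max?_isMax hhi _ (hallmem p hp)
        have hmneq : mnf = lo := pvIsMin_unique (hMM ▸ hminA) hloMin
        have hmxeq : mxf = hi := pvIsMax_unique (hMM ▸ hmaxA) hhiMax
        rw [heqA]
        dsimp only
        clear hvis hRep hRepA hRepIns hInv0A hInv0B hAg
        refine ⟨Z, hZ, ?_, ?_, ?_⟩
        · -- A's visited now holds seen' ∪ Z with seen' = seen ∪ compf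
          refine pvRepA_congr repAf ?_
          intro p
          have hmemMf : p ∈ MfA ↔ p ∈ compf := by
            rw [hMM, ← htfB, List.mem_toFinset]
          dsimp only
          simp only [Set.mem_union, Set.mem_setOf_eq, PySem.Set.mem_update, Finset.mem_coe,
            hSA, hSB]
          rw [hmemMf]
          tauto
        · intro p hp
          dsimp only at hp
          rcases (PySem.Set.mem_update _ _ _).mp hp with hp | hp
          · exact hSin p hp
          · exact invB.hinb p (htfB ▸ List.mem_toFinset.mpr hp)
        · dsimp only
          rw [hacc, hlo, hhi]
          simp only [Option.getD_some]
          rw [hmneq, hmxeq, hcard, pvBump_eq]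

lemma pvColFold_rel (land : List (List Int)) (h w x : Int) (hx : 0 ≤ x ∧ x < w) :
    ∀ (ys : List Int), (∀ y ∈ ys, 0 ≤ y ∧ y < h) →
    ∀ stA stB, pvOuterRel land h w stA stB →
    pvOuterRel land h w (ys.foldl (pvBodyA land h w x) stA) (ys.foldl (pvBodyB land h w x) stB) := by
  intro ys
  induction ys with
  | nil => intro _ stA stB hrel; exact hrel
  | cons y t ih =>
    intro hys stA stB hrel
    simp only [List.foldl_cons]
    exact ih (fun y' hy' => hys y' (List.mem_cons_of_mem _ hy'))
      _ _ (pvBody_rel land h w x y hx (hys y List.mem_cons_self) stA stB hrel)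

lemma pvAllFold_rel (land : List (List Int)) (h w : Int) :
    ∀ (xs : List Int), (∀ x ∈ xs, 0 ≤ x ∧ x < w) →
    ∀ stA stB, pvOuterRel land h w stA stB →
    pvOuterRel land h w
      (xs.foldl (fun st x => (PySem.List.pyRange 0 h 1).foldl (pvBodyA land h w x) st) stA)
      (xs.foldl (fun st x => (PySem.List.pyRange 0 h 1).foldl (pvBodyB land h w x) st) stB) := by
  intro xs
  induction xs with
  | nil => intro _ stA stB hrel; exact hrel
  | cons x t ih =>
    intro hxs stA stB hrel
    simp only [List.foldl_cons]
    refine ih (fun x' hx' => hxs x' (List.mem_cons_of_mem _ hx')) _ _ ?_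
    refine pvColFold_rel land h w x (hxs x List.mem_cons_self) _ ?_ stA stB hrel
    intro y hy
    rw [PySem.List.mem_pyRange_one] at hy
    exact hy

lemma pvV0_get (h w : Int) (p : Int × Int) (hp : pvInb h w p) :
    dfsGet2d ((PySem.List.pyRange 0 h 1).map
      (fun _ => (PySem.List.pyRange 0 w 1).map (fun _ => false))) p.1 p.2 = some false := by
  obtain ⟨h1, h2, h3, h4⟩ := hp
  unfold dfsGet2d
  rw [PySem.List.pyGet?_of_nonneg _ h1, List.getElem?_map]
  have hlen1 : p.1.toNat < (PySem.List.pyRange 0 h 1).length := by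
    rw [PySem.List.length_pyRange_one]
    omega
  rw [List.getElem?_eq_getElem hlen1]
  simp only [Option.map_some, Option.bind_some]
  rw [PySem.List.pyGet?_of_nonneg _ h3, List.getElem?_map]
  have hlen2 : p.2.toNat < (PySem.List.pyRange 0 w 1).length := by
    rw [PySem.List.length_pyRange_one]
    omega
  rw [List.getElem?_eq_getElem hlen2]
  simp

lemma pvInit_rel (land : List (List Int)) (h w : Int) :
    pvOuterRel land h w
      ((PySem.List.pyRange 0 h 1).map (fun _ => (PySem.List.pyRange 0 w 1).map (fun _ => false)),
       (PySem.List.pyRange 0 w 1).map (fun _ => (0 : Int)))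
      (PySem.Set.empty, List.replicate w.toNat (0 : Int)) := by
  refine ⟨∅, by simp, ⟨?_, ?_⟩, ?_, ?_⟩
  · intro p hp
    exact ⟨false, pvV0_get h w p hp⟩
  · intro p hp
    rw [pvV0_get h w p hp]
    constructor
    · intro hft; simp at hft
    · intro hmem
      rcases hmem with hmem | hmem
      · simp only [Set.mem_setOf_eq] at hmem
        exact absurd hmem (List.not_mem_nil)
      · exact absurd hmem (Set.notMem_empty p)
  · intro p hp
    exact absurd hp (List.not_mem_nil)
  · dsimp only
    rw [PySem.List.pyRange_one, List.map_map]
    rw [show ((w : Int) - 0) = w from by ring]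
    refine List.eq_replicate_iff.mpr ⟨by simp, fun b hb => ?_⟩
    exact (by simpa using hb : _ ∧ 0 = b).2.symm


-- ===== VERDICT (by name: the statement is the Claim_ definition above) =====
theorem dfs_spec : Claim_equal_dfs := by
  unfold Claim_equal_dfs
  intro land _ _
  unfold Spec_dfs
  cases land with
  | nil => rfl
  | cons r0 tl =>
    obtain ⟨Z, -, -, -, hacc⟩ := pvAllFold_rel (r0 :: tl) ((r0 :: tl).length : Int) (r0.length : Int)
      (PySem.List.pyRange 0 (r0.length : Int) 1)
      (fun x hx => by rw [PySem.List.mem_pyRange_one] at hx; exact hx)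
      ((PySem.List.pyRange 0 ((r0 :: tl).length : Int) 1).map
        (fun _ => (PySem.List.pyRange 0 (r0.length : Int) 1).map (fun _ => false)),
       (PySem.List.pyRange 0 (r0.length : Int) 1).map (fun _ => (0 : Int)))
      (PySem.Set.empty, List.replicate ((r0.length : Int)).toNat (0 : Int))
      (pvInit_rel (r0 :: tl) ((r0 :: tl).length : Int) (r0.length : Int))
    exact hacc
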